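-- pv_equiv track=rewrite | github.com/whyumesh/neeraj-pillai-stockist | document_converter/extractors/stock_sales_extractor.py | _normalize_header_name
-- ===== SOURCE A (Python) =====
-- def _normalize_header_name(header: str) -> str:
--     """
--     Normalize header name to standard column names
--
--     Maps various header formats to standard names:
--     - "Opening Qty - Qty" -> "Opening Qty"
--     - "Opening Qty - Value" -> "Opening Value"
--     - "opening_qty" -> "Opening Qty"
--     - "OPENING_QTY" -> "Opening Qty"
--     """
--     if not header:
--         return header
--
--     header_lower = header.lower().strip()
--
--     # Map to standard column names
--     # Item Description
--     if any(kw in header_lower for kw in ['item', 'description', 'product', 'name']):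
--         return "Item Description"
--
--     # Opening Qty
--     if 'opening' in header_lower and ('qty' in header_lower or 'quantity' in header_lower):
--         return "Opening Qty"
--
--     # Opening Value
--     if 'opening' in header_lower and ('value' in header_lower or 'amount' in header_lower):
--         return "Opening Value"
--
--     # Receipt Qty
--     if 'receipt' in header_lower and ('qty' in header_lower or 'quantity' in header_lower):
--         return "Receipt Qty"
--
--     # Receipt Value
--     if 'receipt' in header_lower and ('value' in header_lower or 'amount' in header_lower):
--         return "Receipt Value"
--
--     # Issue Qty
--     if 'issue' in header_lower and ('qty' in header_lower or 'quantity' in header_lower):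
--         return "Issue Qty"
--
--     # Issue Value
--     if 'issue' in header_lower and ('value' in header_lower or 'amount' in header_lower):
--         return "Issue Value"
--
--     # Closing Qty
--     if 'closing' in header_lower and ('qty' in header_lower or 'quantity' in header_lower):
--         return "Closing Qty"
--
--     # Closing Value
--     if 'closing' in header_lower and ('value' in header_lower or 'amount' in header_lower):
--         return "Closing Value"
--
--     # Dump Qty
--     if 'dump' in header_lower and ('qty' in header_lower or 'quantity' in header_lower):
--         return "Dump Qty"
--
--     # If no match, return cleaned version
--     return header.strip()
-- ===== SOURCE B (Python) =====
-- def _normalize_header_name(header: str) -> str: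
--     if not header:
--         return header
--     hl = header.lower().strip()
--     if any(kw in hl for kw in ('item', 'description', 'product', 'name')):
--         return "Item Description"
--     # pick primary word and qualifier independently, then compose the name
--     primary = next((p for p in ('opening', 'receipt', 'issue', 'closing', 'dump') if p in hl), None)
--     qualifier = ('Qty' if ('qty' in hl or 'quantity' in hl)
--                  else 'Value' if ('value' in hl or 'amount' in hl)
--                  else None)
--     if primary and qualifier and not (primary == 'dump' and qualifier == 'Value'):
--         return primary.capitalize() + ' ' + qualifier
--     return header.strip()
-- ===== Notes on version B (the rewrite author's own statement) =====
-- stated objective: simpler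
-- what changed: Instead of nine hand-written primary/qualifier branch pairs, B searches for the first primary word and for the qualifier group independently and composes the standard column name by capitalising the primary word and concatenating the qualifier, with the single exception that the dump primary has no Value column.
import Mathlib
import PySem

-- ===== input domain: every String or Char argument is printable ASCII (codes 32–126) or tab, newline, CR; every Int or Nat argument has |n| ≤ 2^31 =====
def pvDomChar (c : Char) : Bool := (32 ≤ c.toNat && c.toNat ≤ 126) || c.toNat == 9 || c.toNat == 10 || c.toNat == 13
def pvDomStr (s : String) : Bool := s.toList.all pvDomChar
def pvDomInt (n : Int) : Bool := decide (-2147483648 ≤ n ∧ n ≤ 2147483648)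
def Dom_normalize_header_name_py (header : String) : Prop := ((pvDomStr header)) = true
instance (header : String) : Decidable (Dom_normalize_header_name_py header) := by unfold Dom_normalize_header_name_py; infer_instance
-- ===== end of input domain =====

-- B decomposes the matching differently: it searches the primary word and the qualifier group independently and composes the standard name by string concatenation (simpler decomposition; same cost).


-- ===== PORT A =====
def normalize_header_name_py (header : String) : String :=
  if header == "" then header
  else
    let header_lower := PySem.Str.strip (PySem.Str.lower header)
    if ["item", "description", "product", "name"].any (fun kw => PySem.Str.isIn kw header_lower) then
      "Item Description"
    else if PySem.Str.isIn "opening" header_lower && (PySem.Str.isIn "qty" header_lower || PySem.Str.isIn "quantity" header_lower) then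
      "Opening Qty"
    else if PySem.Str.isIn "opening" header_lower && (PySem.Str.isIn "value" header_lower || PySem.Str.isIn "amount" header_lower) then
      "Opening Value"
    else if PySem.Str.isIn "receipt" header_lower && (PySem.Str.isIn "qty" header_lower || PySem.Str.isIn "quantity" header_lower) then
      "Receipt Qty"
    else if PySem.Str.isIn "receipt" header_lower && (PySem.Str.isIn "value" header_lower || PySem.Str.isIn "amount" header_lower) then
      "Receipt Value"
    else if PySem.Str.isIn "issue" header_lower && (PySem.Str.isIn "qty" header_lower || PySem.Str.isIn "quantity" header_lower) then
      "Issue Qty"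
    else if PySem.Str.isIn "issue" header_lower && (PySem.Str.isIn "value" header_lower || PySem.Str.isIn "amount" header_lower) then
      "Issue Value"
    else if PySem.Str.isIn "closing" header_lower && (PySem.Str.isIn "qty" header_lower || PySem.Str.isIn "quantity" header_lower) then
      "Closing Qty"
    else if PySem.Str.isIn "closing" header_lower && (PySem.Str.isIn "value" header_lower || PySem.Str.isIn "amount" header_lower) then
      "Closing Value"
    else if PySem.Str.isIn "dump" header_lower && (PySem.Str.isIn "qty" header_lower || PySem.Str.isIn "quantity" header_lower) then
      "Dump Qty"
    else
      PySem.Str.strip header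

-- ===== PORT B =====
-- Python str.capitalize(): first character uppercased, rest lowercased
def pvCapitalize (s : String) : String :=
  match s.toList with
  | [] => s
  | c :: cs => String.ofList (PySem.Chars.upperChar c :: cs.map PySem.Chars.lowerChar)

def normalize_header_name_py_alt (header : String) : String :=
  if header == "" then header
  else
    let hl := PySem.Str.strip (PySem.Str.lower header)
    if ["item", "description", "product", "name"].any (fun kw => PySem.Str.isIn kw hl) then
      "Item Description"
    else
      -- primary = next((p for p in (...) if p in hl), None)
      let primary := ["opening", "receipt", "issue", "closing", "dump"].find? (fun p => PySem.Str.isIn p hl)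
      -- qualifier = 'Qty' if qty/quantity present else 'Value' if value/amount present else None
      let qualifier : Option String :=
        if PySem.Str.isIn "qty" hl || PySem.Str.isIn "quantity" hl then some "Qty"
        else if PySem.Str.isIn "value" hl || PySem.Str.isIn "amount" hl then some "Value"
        else none
      match primary, qualifier with
      | some p, some q =>
        if p == "dump" && q == "Value" then PySem.Str.strip header
        else pvCapitalize p ++ " " ++ q
      | _, _ => PySem.Str.strip header

-- ===== PRECONDITION & SPEC =====
def Spec_normalize_header_name_py (header : String) (out : String) : Prop := out = normalize_header_name_py_alt header
instance (header : String) (out : String) : Decidable (Spec_normalize_header_name_py header out) := by unfold Spec_normalize_header_name_py; infer_instance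

-- ===== CLAIM =====
def Claim_equal_normalize_header_name_py : Prop := ∀ (header : String), Dom_normalize_header_name_py header → Spec_normalize_header_name_py header (normalize_header_name_py header)

-- ===== LEMMAS AND PROOFS =====
-- Both ports branch on the same boolean atoms (membership of each keyword group and of each
-- primary word in the lowered, stripped header); unfolding B's first-match search into its
-- branch form and abstracting those atoms reduces the equivalence to a finite boolean
-- tautology, checked by exhaustive case split.
theorem pvCapO : pvCapitalize "opening" = "Opening" := by decide
theorem pvCapR : pvCapitalize "receipt" = "Receipt" := by decide
theorem pvCapI : pvCapitalize "issue" = "Issue" := by decide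
theorem pvCapC : pvCapitalize "closing" = "Closing" := by decide
theorem pvCapD : pvCapitalize "dump" = "Dump" := by decide

theorem pvFind5 (hl : String) :
  (["opening","receipt","issue","closing","dump"].find? (fun p => PySem.Str.isIn p hl))
  = (if PySem.Str.isIn "opening" hl then some "opening"
     else if PySem.Str.isIn "receipt" hl then some "receipt"
     else if PySem.Str.isIn "issue" hl then some "issue"
     else if PySem.Str.isIn "closing" hl then some "closing"
     else if PySem.Str.isIn "dump" hl then some "dump"
     else none) := by
  cases h1 : PySem.Str.isIn "opening" hl <;>
  cases h2 : PySem.Str.isIn "receipt" hl <;>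
  cases h3 : PySem.Str.isIn "issue" hl <;>
  cases h4 : PySem.Str.isIn "closing" hl <;>
  cases h5 : PySem.Str.isIn "dump" hl <;>
    simp only [List.find?, h1, h2, h3, h4, h5] <;> simp

-- ===== VERDICT =====
set_option maxHeartbeats 2000000 in
theorem normalize_header_name_py_spec : Claim_equal_normalize_header_name_py := by
  intro header _
  unfold Spec_normalize_header_name_py normalize_header_name_py normalize_header_name_py_alt
  by_cases h : header == ""
  · simp [h]
  · simp only [h, Bool.false_eq_true, if_false]
    rw [pvFind5]
    generalize (["item", "description", "product", "name"].any
      (fun kw => PySem.Str.isIn kw (PySem.Str.strip (PySem.Str.lower header)))) = it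
    generalize (PySem.Str.isIn "qty" (PySem.Str.strip (PySem.Str.lower header)) ||
      PySem.Str.isIn "quantity" (PySem.Str.strip (PySem.Str.lower header))) = q
    generalize (PySem.Str.isIn "value" (PySem.Str.strip (PySem.Str.lower header)) ||
      PySem.Str.isIn "amount" (PySem.Str.strip (PySem.Str.lower header))) = v
    generalize PySem.Str.isIn "opening" (PySem.Str.strip (PySem.Str.lower header)) = o
    generalize PySem.Str.isIn "receipt" (PySem.Str.strip (PySem.Str.lower header)) = r
    generalize PySem.Str.isIn "issue" (PySem.Str.strip (PySem.Str.lower header)) = i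
    generalize PySem.Str.isIn "closing" (PySem.Str.strip (PySem.Str.lower header)) = c
    generalize PySem.Str.isIn "dump" (PySem.Str.strip (PySem.Str.lower header)) = d
    cases it <;> cases q <;> cases v <;> cases o <;> cases r <;> cases i <;> cases c <;> cases d <;> simp [pvCapO, pvCapR, pvCapI, pvCapC, pvCapD]
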